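-- pv_equiv track=rewrite | github.com/mranzinger/EAST | utils.py | _dense_list_to_spans
-- ===== SOURCE A (Python) =====
-- def _dense_list_to_spans(values):
--     """
--     Converts a list of integers in increasing order to a span string representing the same set.
--
--     e.g. [0, 1, 5, 6, 7] -> ['0-1', '5-7']
--
--     Args:
--         values (list<int>): List of ints in increasing order.
--
--     Returns:
--         span (list<str>): List of contiguous spans.
--     """
--     if not values:
--         return []
--
--     first_index = 0
--     spans = []
--
--     def _get_span_string(start_index, end_index):
--         if start_index == end_index:
--             return str(values[start_index])
--         return '{}-{}'.format(values[start_index], values[end_index])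
--
--     for i in range(1, len(values)):
--         prev_value = values[i - 1]
--         curr_value = values[i]
--
--         if curr_value != (prev_value + 1):
--             spans.append(_get_span_string(first_index, i - 1))
--             first_index = i
--
--     spans.append(_get_span_string(first_index, len(values) - 1))
--
--     return spans
-- ===== SOURCE B (Python) =====
-- def _dense_list_to_spans(values):
--     """Peel off one maximal contiguous run at a time, detected arithmetically
--     (values[i + k] == head + k), and emit its span from head and run length alone."""
--     spans = []
--     i = 0
--     n = len(values)
--     while i < n:
--         head = values[i]
--         run_len = 1
--         while i + run_len < n and values[i + run_len] == head + run_len: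
--             run_len += 1
--         spans.append(str(head) if run_len == 1 else '{}-{}'.format(head, head + run_len - 1))
--         i += run_len
--     return spans
-- ===== Notes on version B (the rewrite author's own statement) =====
-- stated objective: alternative
-- what changed: Replaced A's flat indexed loop with running first_index/spans accumulators and +1 break tests by a recursion that peels off each leading contiguous run arithmetically (values[k] == head + k) and recurses on the remaining suffix.
import Mathlib
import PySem

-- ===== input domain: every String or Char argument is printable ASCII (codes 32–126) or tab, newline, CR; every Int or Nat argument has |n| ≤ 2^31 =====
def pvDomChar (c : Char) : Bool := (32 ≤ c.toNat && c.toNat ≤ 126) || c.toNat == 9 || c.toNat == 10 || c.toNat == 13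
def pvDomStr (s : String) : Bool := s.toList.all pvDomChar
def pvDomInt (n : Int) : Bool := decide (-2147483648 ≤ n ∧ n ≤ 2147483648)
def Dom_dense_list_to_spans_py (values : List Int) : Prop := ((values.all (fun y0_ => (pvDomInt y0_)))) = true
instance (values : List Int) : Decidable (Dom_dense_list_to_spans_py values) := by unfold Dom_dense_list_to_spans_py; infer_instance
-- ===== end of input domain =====

-- B replaces A's flat indexed loop (running first_index + break test) by a recursion that
-- peels off each leading contiguous run arithmetically and recurses on the remainder (objective: alternative).

-- ===== PORT A =====
-- _get_span_string(start_index, end_index); the indices A passes are always in range, so pyGetD's default is never read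
def fmtA (values : List Int) (start_index end_index : Int) : String :=
  if start_index = end_index then PySem.Int.toStr (PySem.List.pyGetD values start_index 0)
  else PySem.Int.toStr (PySem.List.pyGetD values start_index 0) ++ "-" ++
       PySem.Int.toStr (PySem.List.pyGetD values end_index 0)

-- one iteration of A's 'for i in range(1, len(values))' loop; state = (first_index, spans)
def stepA (values : List Int) (st : Int × List String) (i : Int) : Int × List String :=
  let prev_value := PySem.List.pyGetD values (i - 1) 0
  let curr_value := PySem.List.pyGetD values i 0
  if curr_value ≠ prev_value + 1 then (i, st.2 ++ [fmtA values st.1 (i - 1)]) else st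

def dense_list_to_spans_py (values : List Int) : List String :=
  if values = [] then []
  else
    let n : Int := PySem.List.len values
    let res := (PySem.List.pyRange 1 n 1).foldl (stepA values) (0, [])
    res.2 ++ [fmtA values res.1 (n - 1)]

-- ===== PORT B =====
-- B's inner 'while i + run_len < n and values[i + run_len] == head + run_len' counter, run on
-- the suffix after the run's head: number of further elements continuing the run (v = head + k, k from 1)
def pyRunExt (head : Int) (k : Int) : List Int → Nat
  | [] => 0
  | v :: rest => if v = head + k then 1 + pyRunExt head (k + 1) rest else 0

-- B's outer 'while i < n' loop, ported as the obvious structural recursion on the remaining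
-- suffix (i ↦ values.drop i, so 'i += run_len' is 'rest.drop (run_len - 1)'); same state (head, run_len, spans)
def dense_list_to_spans_py_alt : List Int → List String
  | [] => []
  | head :: rest =>
    let run_len : Nat := 1 + pyRunExt head 1 rest
    let span := if run_len = 1 then PySem.Int.toStr head
      else PySem.Int.toStr head ++ "-" ++ PySem.Int.toStr (head + (run_len : Int) - 1)
    span :: dense_list_to_spans_py_alt (rest.drop (run_len - 1))
  termination_by l => l.length
  decreasing_by simp

-- ===== PRECONDITION & SPEC =====
def Spec_dense_list_to_spans_py (values : List Int) (out : List String) : Prop := out = dense_list_to_spans_py_alt values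
instance (values : List Int) (out : List String) : Decidable (Spec_dense_list_to_spans_py values out) := by unfold Spec_dense_list_to_spans_py; infer_instance

-- ===== CLAIM (what is proved, stated in full; the proofs are below) =====
def Claim_equal_dense_list_to_spans_py : Prop := ∀ (values : List Int), Dom_dense_list_to_spans_py values → Spec_dense_list_to_spans_py values (dense_list_to_spans_py values)

-- ===== LEMMAS AND PROOFS =====

lemma getD_drop (vs : List Int) (f j : Nat) :
    (vs.drop f).getD j 0 = vs.getD (f + j) 0 := by
  simp [List.getD_eq_getElem?_getD, List.getElem?_drop]

-- characterization of pyRunExt by its defining properties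
lemma pyRunExt_eq (l : List Int) (h k : Int) (m : Nat)
    (hm : m ≤ l.length)
    (hall : ∀ j : Nat, j < m → l.getD j 0 = h + k + j)
    (hbrk : m = l.length ∨ l.getD m 0 ≠ h + k + m) :
    pyRunExt h k l = m := by
  induction l generalizing k m with
  | nil =>
    simp only [List.length_nil, Nat.le_zero] at hm
    simp [pyRunExt, hm]
  | cons v t ih =>
    cases m with
    | zero =>
      rcases hbrk with hb | hb
      · simp at hb
      · simp at hb
        simp [pyRunExt, hb]
    | succ m' =>
      have hv : v = h + k := by simpa using hall 0 (by omega)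
      have : pyRunExt h (k + 1) t = m' := by
        refine ih (k + 1) m' (by simpa using hm) ?_ ?_
        · intro j hj
          have := hall (j + 1) (by omega)
          rw [List.getD_cons_succ] at this
          push_cast at this ⊢
          omega
        · rcases hbrk with hb | hb
          · left; simpa using hb
          · right
            rw [List.getD_cons_succ] at hb
            push_cast at hb ⊢
            omega
      simp [pyRunExt, hv, this]
      omega

-- B's head span for the suffix starting at f, when the run f..a-1 is maximal
lemma alt_suffix (vs : List Int) (f a : Nat)
    (hfa : f < a) (han : a ≤ vs.length)
    (hrun : ∀ j : Nat, f ≤ j → j < a → vs.getD j 0 = vs.getD f 0 + ((j - f : Nat) : Int))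
    (hbrk : a = vs.length ∨ vs.getD a 0 ≠ vs.getD f 0 + ((a - f : Nat) : Int)) :
    dense_list_to_spans_py_alt (vs.drop f) =
      fmtA vs (f : Int) ((a : Int) - 1) :: dense_list_to_spans_py_alt (vs.drop a) := by
  have hfn : f < vs.length := by omega
  have hdrop : vs.drop f = vs[f] :: vs.drop (f + 1) := List.drop_eq_getElem_cons hfn
  have hgf : vs.getD f 0 = vs[f] := List.getD_eq_getElem vs 0 hfn
  have hext : pyRunExt vs[f] 1 (vs.drop (f + 1)) = a - (f + 1) := by
    apply pyRunExt_eq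
    · simp; omega
    · intro j hj
      rw [getD_drop]
      have h1 := hrun (f + 1 + j) (by omega) (by omega)
      have h2 : (f + 1 + j) - f = j + 1 := by omega
      rw [h2] at h1
      rw [h1, hgf]
      push_cast; ring
    · rcases hbrk with hb | hb
      · left; simp; omega
      · right
        rw [getD_drop]
        have h2 : f + 1 + (a - (f + 1)) = a := by omega
        rw [h2]
        intro hcon
        apply hb
        rw [hcon, hgf]
        have h3 : (a - f : Nat) = (a - (f + 1)) + 1 := by omega
        rw [h3]; push_cast; ring
  rw [hdrop, dense_list_to_spans_py_alt, hext]
  have htail : (vs.drop (f + 1)).drop (1 + (a - (f + 1)) - 1) = vs.drop a := by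
    rw [List.drop_drop]
    congr 1
    omega
  rw [htail]
  congr 1
  -- span = fmtA vs f (a-1)
  unfold fmtA
  by_cases hone : a = f + 1
  · have hc1 : 1 + (a - (f + 1)) = 1 := by omega
    have hc2 : (f : Int) = (a : Int) - 1 := by omega
    rw [hc1, if_pos rfl, if_pos hc2]
    rw [PySem.List.pyGetD_natCast]
    rw [hgf]
  · have hc1 : 1 + (a - (f + 1)) ≠ 1 := by omega
    have hc2 : (f : Int) ≠ (a : Int) - 1 := by
      intro h; apply hone; omega
    rw [if_neg hc1, if_neg hc2]
    have ha1 : (a : Int) - 1 = ((a - 1 : Nat) : Int) := by omega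
    rw [ha1, PySem.List.pyGetD_natCast, PySem.List.pyGetD_natCast, hgf]
    congr 2
    have h1 := hrun (a - 1) (by omega) (by omega)
    rw [h1, hgf]
    have h2 : (a - 1 - f : Nat) = a - f - 1 := by omega
    rw [h2]
    have h3 : (a - f - 1 : Nat) = (1 + (a - (f + 1))) - 1 := by omega
    rw [h3]
    push_cast [Nat.one_le_iff_ne_zero]
    omega

-- main loop invariant: A's fold from index a (d = number of remaining iterations), with the
-- current run starting at f, produces s ++ (B of the suffix starting at f)
lemma loopA_spec (vs : List Int) (d : Nat) : ∀ (f a : Nat) (s : List String),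
    vs.length - a = d → f < a → a ≤ vs.length →
    (∀ j : Nat, f ≤ j → j < a → vs.getD j 0 = vs.getD f 0 + ((j - f : Nat) : Int)) →
    (((PySem.List.pyRange (a : Int) (vs.length : Int) 1).foldl (stepA vs) ((f : Int), s)).2 ++
      [fmtA vs (((PySem.List.pyRange (a : Int) (vs.length : Int) 1).foldl (stepA vs) ((f : Int), s)).1) ((vs.length : Int) - 1)])
      = s ++ dense_list_to_spans_py_alt (vs.drop f) := by
  induction d with
  | zero =>
    intro f a s hd hfa han hrun
    have ha : a = vs.length := by omega
    rw [PySem.List.pyRange_one_eq_nil (by omega)]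
    rw [alt_suffix vs f a hfa han hrun (Or.inl ha)]
    subst ha
    simp [dense_list_to_spans_py_alt]
  | succ d ih =>
    intro f a s hd hfa han hrun
    have hlt : a < vs.length := by omega
    rw [PySem.List.pyRange_one_cons (by exact_mod_cast hlt)]
    rw [List.foldl_cons]
    have ha1 : (a : Int) - 1 = ((a - 1 : Nat) : Int) := by omega
    have hstep : stepA vs ((f : Int), s) (a : Int) =
        if vs.getD a 0 ≠ vs.getD (a - 1) 0 + 1
        then ((a : Int), s ++ [fmtA vs (f : Int) ((a : Int) - 1)])
        else ((f : Int), s) := by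
      unfold stepA
      rw [ha1, PySem.List.pyGetD_natCast, PySem.List.pyGetD_natCast]
    have hcast : ((a + 1 : Nat) : Int) = (a : Int) + 1 := by push_cast; ring
    by_cases hc : vs.getD a 0 = vs.getD (a - 1) 0 + 1
    · rw [hstep, if_neg (by simpa using hc)]
      have hrun' : ∀ j : Nat, f ≤ j → j < a + 1 →
          vs.getD j 0 = vs.getD f 0 + ((j - f : Nat) : Int) := by
        intro j hfj hja
        by_cases hja' : j < a
        · exact hrun j hfj hja'
        · have hj : j = a := by omega
          rw [hj]
          have h1 := hrun (a - 1) (by omega) (by omega)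
          rw [hc, h1]
          have h2 : (a - f : Nat) = (a - 1 - f) + 1 := by omega
          rw [h2]
          push_cast; ring
      have hres := ih f (a + 1) s (by omega) (by omega) (by omega) hrun'
      rw [hcast] at hres
      exact hres
    · rw [hstep, if_pos (by simpa using hc)]
      have hrun' : ∀ j : Nat, a ≤ j → j < a + 1 →
          vs.getD j 0 = vs.getD a 0 + ((j - a : Nat) : Int) := by
        intro j h1 h2
        have hj : j = a := by omega
        rw [hj]
        simp
      have hres := ih a (a + 1) (s ++ [fmtA vs (f : Int) ((a : Int) - 1)])
        (by omega) (by omega) (by omega) hrun'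
      rw [hcast] at hres
      rw [hres]
      have hbrk : a = vs.length ∨ vs.getD a 0 ≠ vs.getD f 0 + ((a - f : Nat) : Int) := by
        right
        intro hcon
        apply hc
        have h1 := hrun (a - 1) (by omega) (by omega)
        rw [hcon, h1]
        have h2 : (a - f : Nat) = (a - 1 - f) + 1 := by omega
        rw [h2]
        push_cast; ring
      rw [alt_suffix vs f a hfa (by omega) hrun hbrk]
      simp

-- ===== VERDICT (by name: the statement is the Claim_ definition above) =====
theorem dense_list_to_spans_py_spec : Claim_equal_dense_list_to_spans_py := by
  intro values _
  unfold Spec_dense_list_to_spans_py dense_list_to_spans_py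
  by_cases hnil : values = []
  · subst hnil; rw [dense_list_to_spans_py_alt]; simp
  · have hlen : 1 ≤ values.length := by
      cases values with
      | nil => exact absurd rfl hnil
      | cons a t => simp
    have := loopA_spec values (values.length - 1) 0 1 [] rfl (by omega) hlen
      (by intro j h0 h1; interval_cases j; simp)
    simp [hnil, PySem.List.len]
    simpa using this
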